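-- pv_equiv track=rewrite | github.com/vitalii-levko/42_n_puzzle | popanase/npuzzle.py | get_inversion_dict
-- ===== SOURCE A (Python) =====
-- def get_inversion_dict(puzzle):
--     inversion_dict = dict()
--     for check_row in range(len(puzzle)):
--         for check_col in range(len(puzzle[0])):
--             to_check = puzzle[check_row][check_col]
--             inversion_dict[to_check] = list()
--             for row in range(len(puzzle)):
--                 if row >= check_row:
--                     for col in range(len(puzzle[0])):
--                         if (col >= check_col or (col < check_col and row != check_row)) and to_check != puzzle[row][col]:
--                             inversion_dict[to_check].append(puzzle[row][col])
--     return inversion_dict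
-- ===== SOURCE B (Python) =====
-- def get_inversion_dict(puzzle):
--     flat = [row[c] for row in puzzle for c in range(len(puzzle[0]))]
--     result = dict()
--     for i, value in enumerate(flat):
--         result[value] = [x for x in flat[i + 1:] if x != value]
--     return result
-- ===== Notes on version B (the rewrite author's own statement) =====
-- stated objective: simpler
-- what changed: B flattens the grid once in reading order (first len(puzzle[0]) columns of every row) and builds each entry as the filtered suffix flat[i+1:] of the flat list, replacing A's four nested row/column index loops with their disjunctive position comparison.
import Mathlib
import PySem

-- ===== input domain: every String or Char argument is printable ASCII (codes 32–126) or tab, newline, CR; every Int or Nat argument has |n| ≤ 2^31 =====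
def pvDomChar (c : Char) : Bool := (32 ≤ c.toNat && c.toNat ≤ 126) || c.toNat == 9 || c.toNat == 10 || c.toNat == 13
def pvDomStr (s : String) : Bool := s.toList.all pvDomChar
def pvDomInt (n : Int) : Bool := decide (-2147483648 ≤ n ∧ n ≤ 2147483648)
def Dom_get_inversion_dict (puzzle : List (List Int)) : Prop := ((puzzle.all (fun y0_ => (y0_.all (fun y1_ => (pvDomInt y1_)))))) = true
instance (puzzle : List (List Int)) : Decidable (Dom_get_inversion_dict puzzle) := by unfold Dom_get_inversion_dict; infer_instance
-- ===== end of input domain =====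

-- B replaces A's four nested index loops by flattening the grid once and taking, for each
-- cell, the filtered suffix of the flat list (objective: simpler).

-- ===== PORT A =====
def get_inversion_dict (puzzle : List (List Int)) : List (Int × List Int) :=
  ((PySem.List.pyRange 0 (puzzle.length : Int)).foldl (fun d check_row =>
    (PySem.List.pyRange 0 (((PySem.List.pyGet? puzzle 0).getD []).length : Int)).foldl (fun d check_col =>
      let to_check : Int := (PySem.List.pyGet? ((PySem.List.pyGet? puzzle check_row).getD []) check_col).getD 0
      let d := d.insert to_check ([] : List Int)
      (PySem.List.pyRange 0 (puzzle.length : Int)).foldl (fun d row =>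
        if row ≥ check_row then
          (PySem.List.pyRange 0 (((PySem.List.pyGet? puzzle 0).getD []).length : Int)).foldl (fun d col =>
            if (col ≥ check_col ∨ (col < check_col ∧ row ≠ check_row)) ∧
                to_check ≠ (PySem.List.pyGet? ((PySem.List.pyGet? puzzle row).getD []) col).getD 0 then
              d.modify to_check [] (fun l => l ++ [(PySem.List.pyGet? ((PySem.List.pyGet? puzzle row).getD []) col).getD 0])
            else d) d
        else d) d) d) PySem.Dict.empty).items

-- ===== PORT B =====
def get_inversion_dict_alt (puzzle : List (List Int)) : List (Int × List Int) :=
  let flat : List Int := puzzle.flatMap (fun row =>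
    (PySem.List.pyRange 0 (((PySem.List.pyGet? puzzle 0).getD []).length : Int)).map
      (fun c => (PySem.List.pyGet? row c).getD 0))
  ((PySem.List.enumerate flat).foldl (fun d p =>
      d.insert p.2 ((PySem.List.slice flat (some (p.1 + 1)) none).filter (fun x => x != p.2)))
    PySem.Dict.empty).items

-- ===== PRECONDITION & SPEC =====
-- Pre_ excludes grids with a row shorter than the first row, on which A raises IndexError
-- (B raises there too); rows longer than the first are admitted (A reads only the first
-- len(puzzle[0]) columns of every row, and so does B).
def Pre_get_inversion_dict (puzzle : List (List Int)) : Prop :=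
  ∀ row ∈ puzzle, (puzzle.headD []).length ≤ row.length
instance (puzzle : List (List Int)) : Decidable (Pre_get_inversion_dict puzzle) := by
  unfold Pre_get_inversion_dict; infer_instance
def pvWitness_get_inversion_dict : List (List Int) := [[1, 2], [3, 4]]
def Spec_get_inversion_dict (puzzle : List (List Int)) (out : List (Int × List Int)) : Prop := out = get_inversion_dict_alt puzzle
instance (puzzle : List (List Int)) (out : List (Int × List Int)) : Decidable (Spec_get_inversion_dict puzzle out) := by unfold Spec_get_inversion_dict; infer_instance

-- ===== CLAIM (what is proved, stated in full; the proofs are below) =====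
def Claim_equal_get_inversion_dict : Prop := ∀ (puzzle : List (List Int)), Dom_get_inversion_dict puzzle → Pre_get_inversion_dict puzzle → Spec_get_inversion_dict puzzle (get_inversion_dict puzzle)

-- ===== LEMMAS AND PROOFS =====

-- the inner 'append to inversion_dict[to_check]' column loop, already started from an insert at that key
theorem pvColFold {β : Type} (v : Int) (g : β → Int) (xs : List β)
    (d : PySem.Dict Int (List Int)) (a : List Int) :
    xs.foldl (fun d x => d.modify v [] (fun l => l ++ [g x])) (d.insert v a)
      = d.insert v (a ++ xs.map g) := by
  induction xs generalizing a with
  | nil => simp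
  | cons x xs ih =>
    have hstep : ((d.insert v a).modify v [] fun l => l ++ [g x]) = d.insert v (a ++ [g x]) := by
      rw [PySem.Dict.modify, PySem.Dict.getD_insert_self, PySem.Dict.insert_insert_self]
    rw [List.foldl_cons, hstep, ih]
    simp

-- the whole per-cell row/column loop, started from the insert at to_check
theorem pvCellFold {α β : Type} (v : Int) (q : α → Prop) [DecidablePred q]
    (p : α → β → Prop) [∀ r c, Decidable (p r c)] (g : α → β → Int)
    (cols : List β) (rows : List α) (d : PySem.Dict Int (List Int)) (a : List Int) :
    rows.foldl (fun d r =>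
        if q r then
          cols.foldl (fun d c =>
            if p r c then d.modify v [] (fun l => l ++ [g r c]) else d) d
        else d) (d.insert v a)
      = d.insert v (a ++ (rows.filter (fun r => decide (q r))).flatMap
          (fun r => (cols.filter (fun c => decide (p r c))).map (g r))) := by
  induction rows generalizing a with
  | nil => simp
  | cons r rows ih =>
    simp only [List.foldl_cons, List.filter_cons]
    by_cases h : q r
    · simp only [h, if_pos, decide_true]
      have hinner : cols.foldl (fun d c =>
          if p r c then d.modify v [] (fun l => l ++ [g r c]) else d) (d.insert v a)
          = d.insert v (a ++ (cols.filter (fun c => decide (p r c))).map (g r)) := by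
        rw [PySem.List.foldl_ite_eq_foldl_filter (p r)
          (fun d c => d.modify v [] (fun l => l ++ [g r c])) cols (d.insert v a)]
        exact pvColFold v (g r) _ d a
      rw [hinner, ih]
      simp [List.append_assoc]
    · simp only [h, if_neg, not_false_iff, decide_false]
      rw [ih]
      simp

-- enumerate as a map over List.range
theorem pvEnumEq {α : Type} [Inhabited α] (xs : List α) :
    PySem.List.enumerate xs = (List.range xs.length).map (fun (k : Nat) => ((k : Int), xs.getD k default)) := by
  apply List.ext_getElem
  · simp [PySem.List.length_enumerate]
  · intro k h1 h2
    simp only [PySem.List.length_enumerate] at h1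
    rw [PySem.List.getElem_enumerate]
    have hk : k < xs.length := h1
    simp [List.getD_eq_getElem?_getD, List.getElem?_eq_getElem hk]

-- a map of getD over a range reconstructs a drop
theorem pvMapGetDDrop {α : Type} (l : List α) (d : α) (c : Nat) (h : c ≤ l.length) :
    (List.range (l.length - c)).map (fun k => l.getD (c + k) d) = l.drop c := by
  apply List.ext_getElem
  · simp
  · intro k h1 h2
    simp only [List.getElem_map, List.getElem_range, List.getElem_drop]
    have hck : c + k < l.length := by simp at h1; omega
    rw [List.getD_eq_getElem _ _ hck]

theorem pvMapGetDSelf {α : Type} (l : List α) (d : α) :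
    (List.range l.length).map (fun k => l.getD k d) = l := by
  have := pvMapGetDDrop l d 0 (Nat.zero_le _)
  simpa using this

-- filter of a range by a lower bound
theorem pvMapGetDTake {α : Type} (l : List α) (d : α) (m : Nat) (h : m ≤ l.length) :
    (List.range m).map (fun k => l.getD k d) = l.take m := by
  apply List.ext_getElem
  · simp; omega
  · intro k h1 h2
    simp only [List.getElem_map, List.getElem_range, List.getElem_take]
    have hk : k < l.length := by simp at h1; omega
    rw [List.getD_eq_getElem _ _ hk]

theorem pvFilterRangeLe (n r : Nat) (h : r ≤ n) :
    (List.range n).filter (fun x => decide (r ≤ x)) = (List.range (n - r)).map (fun k => r + k) := by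
  have : n = r + (n - r) := by omega
  rw [this, List.range_add]
  rw [List.filter_append]
  have h1 : (List.range r).filter (fun x => decide (r ≤ x)) = [] := by
    apply List.filter_eq_nil_iff.mpr
    intro x hx
    simp only [List.mem_range] at hx
    simp; omega
  have h2 : ((List.range (n - r)).map (fun k => r + k)).filter (fun x => decide (r ≤ x))
      = (List.range (n - r)).map (fun k => r + k) := by
    apply List.filter_eq_self.mpr
    intro x hx
    simp only [List.mem_map] at hx
    obtain ⟨k, _, rfl⟩ := hx
    simp
  rw [h1, h2]; simp

-- filter commutes with flatMap
theorem pvFilterFlatMap {α β : Type} (l : List α) (f : α → List β) (p : β → Bool) :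
    (l.flatMap f).filter p = l.flatMap (fun x => (f x).filter p) := by
  induction l with
  | nil => simp
  | cons x xs ih => simp [List.flatMap_cons, List.filter_append, ih]

-- length of the flattening of a rectangular grid
theorem pvFlatLen (P : List (List Int)) (w : Nat) (hw : ∀ row ∈ P, row.length = w) :
    (P.flatMap (fun row => row)).length = P.length * w := by
  induction P with
  | nil => simp
  | cons row rest ih =>
    simp only [List.flatMap_cons, List.length_append, List.length_cons]
    rw [hw row (by simp), ih (fun r hr => hw r (by simp [hr]))]
    ring

-- indexing the flattening of a rectangular grid
theorem pvFlatGetD (P : List (List Int)) (w : Nat) (hw : ∀ row ∈ P, row.length = w)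
    (r c : Nat) (hr : r < P.length) (hc : c < w) :
    (P.flatMap (fun row => row)).getD (r * w + c) 0 = (P.getD r []).getD c 0 := by
  induction P generalizing r with
  | nil => simp at hr
  | cons row rest ih =>
    cases r with
    | zero =>
      simp only [List.flatMap_cons, List.getD_cons_zero, Nat.zero_mul, Nat.zero_add]
      rw [List.getD_append]
      rw [hw row (by simp)]; exact hc
    | succ r =>
      simp only [List.flatMap_cons, List.getD_cons_succ]
      have hlen : row.length = w := hw row (by simp)
      have heq : (r + 1) * w + c = row.length + (r * w + c) := by rw [hlen]; ring
      rw [heq, List.getD_append_right _ _ _ _ (by omega)]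
      have heq2 : row.length + (r * w + c) - row.length = r * w + c := by omega
      rw [heq2]
      exact ih (fun rr hrr => hw rr (by simp [hrr])) r (by simpa using hr)

-- dropping into the flattening of a rectangular grid
theorem pvFlatDrop (P : List (List Int)) (w : Nat) (hw : ∀ row ∈ P, row.length = w)
    (r c : Nat) (hr : r < P.length) (hc : c ≤ w) :
    (P.flatMap (fun row => row)).drop (r * w + c)
      = (P.getD r []).drop c ++ (P.drop (r + 1)).flatMap (fun row => row) := by
  induction P generalizing r with
  | nil => simp at hr
  | cons row rest ih =>
    cases r with
    | zero =>
      simp only [List.flatMap_cons, Nat.zero_mul, Nat.zero_add, List.getD_cons_zero,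
        List.drop_succ_cons, List.drop_zero]
      rw [List.drop_append]
      have hlen : row.length = w := hw row (by simp)
      have : c - row.length = 0 := by omega
      rw [this]; simp
    | succ r =>
      simp only [List.flatMap_cons, List.getD_cons_succ, List.drop_succ_cons]
      have hlen : row.length = w := hw row (by simp)
      rw [List.drop_append]
      have h1 : row.length ≤ (r + 1) * w + c := by rw [hlen]; nlinarith
      rw [List.drop_eq_nil_of_le h1]
      have : (r + 1) * w + c - row.length = r * w + c := by rw [hlen]; ring_nf; omega
      rw [this]
      simp only [List.nil_append]
      exact ih (fun rr hrr => hw rr (by simp [hrr])) r (by simpa using hr)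

-- a nested fold over a w-strided pair of ranges is a fold over the product range
theorem pvNestedRange {δ : Type} (G : δ → Nat → δ) (n w : Nat) (init : δ) :
    (List.range n).foldl (fun d r => (List.range w).foldl (fun d c => G d (r * w + c)) d) init
      = (List.range (n * w)).foldl G init := by
  induction n generalizing init with
  | zero => simp
  | succ n ih =>
    rw [List.range_succ, List.foldl_append]
    rw [ih]
    have : (n + 1) * w = n * w + w := by ring
    rw [this, List.range_add, List.foldl_append, List.foldl_map]
    simp

-- the per-cell collection of A equals the filtered suffix of the flattened rectangular grid
theorem pvPayloadRect (P : List (List Int)) (w : Nat) (hw : ∀ row ∈ P, row.length = w)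
    (r c : Nat) (hr : r < P.length) (hc : c < w) :
    ((List.range P.length).filter (fun (r1 : Nat) => decide ((r1 : Int) ≥ (r : Int)))).flatMap
      (fun (r1 : Nat) => ((List.range w).filter (fun (c1 : Nat) => decide
          ((((c1 : Int) ≥ (c : Int)) ∨ ((c1 : Int) < (c : Int) ∧ (r1 : Int) ≠ (r : Int))) ∧
            (P.getD r []).getD c 0 ≠ (P.getD r1 []).getD c1 0))).map
        (fun (col : Nat) => (P.getD r1 []).getD col 0))
    = ((P.flatMap (fun row => row)).drop (r * w + c + 1)).filter
        (fun x => x != (P.getD r []).getD c 0) := by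
  have hrows : (List.range P.length).filter (fun (r1 : Nat) => decide ((r1 : Int) ≥ (r : Int)))
      = (List.range (P.length - r)).map (fun k => r + k) := by
    rw [← pvFilterRangeLe _ _ (le_of_lt hr)]
    apply List.filter_congr
    intro a _
    simp [ge_iff_le]
  rw [hrows, show P.length - r = (P.length - r - 1) + 1 from by omega,
    List.range_succ_eq_map, List.map_cons, List.flatMap_cons]
  have hrowmem : ∀ i : Nat, i < P.length → P.getD i [] ∈ P := by
    intro i hi
    rw [List.getD_eq_getElem _ _ hi]
    exact List.getElem_mem hi
  have hlenr : (P.getD r []).length = w := hw _ (hrowmem r hr)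
  have hhead : ((List.range w).filter (fun (c1 : Nat) => decide
        ((((c1 : Int) ≥ (c : Int)) ∨ ((c1 : Int) < (c : Int) ∧ ((r + 0 : Nat) : Int) ≠ (r : Int))) ∧
          (P.getD r []).getD c 0 ≠ (P.getD (r + 0) []).getD c1 0))).map
        (fun (col : Nat) => (P.getD (r + 0) []).getD col 0)
      = ((P.getD r []).drop c).filter (fun v => decide ((P.getD r []).getD c 0 ≠ v)) := by
    have h1 : (List.range w).filter (fun (c1 : Nat) => decide
          ((((c1 : Int) ≥ (c : Int)) ∨ ((c1 : Int) < (c : Int) ∧ ((r + 0 : Nat) : Int) ≠ (r : Int))) ∧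
            (P.getD r []).getD c 0 ≠ (P.getD (r + 0) []).getD c1 0))
        = ((List.range w).filter (fun (c1 : Nat) => decide (c ≤ c1))).filter
            (fun (c1 : Nat) => decide ((P.getD r []).getD c 0 ≠ (P.getD r []).getD c1 0)) := by
      rw [List.filter_filter]
      apply List.filter_congr
      intro a _
      simp only [Nat.add_zero, ge_iff_le, Int.ofNat_le]
      by_cases hca : c ≤ a
      · simp [hca]
      · simp [hca]
    rw [h1]
    simp only [Nat.add_zero]
    rw [show (fun (c1 : Nat) => decide ((P.getD r []).getD c 0 ≠ (P.getD r []).getD c1 0))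
        = ((fun v => decide ((P.getD r []).getD c 0 ≠ v)) ∘ (fun (c1 : Nat) => (P.getD r []).getD c1 0)) from rfl]
    rw [← List.filter_map]
    rw [pvFilterRangeLe w c (le_of_lt hc), List.map_map]
    congr 1
    rw [show ((fun (c1 : Nat) => (P.getD r []).getD c1 0) ∘ (fun k => c + k))
        = (fun k => (P.getD r []).getD (c + k) 0) from rfl]
    rw [← pvMapGetDDrop (P.getD r []) 0 c (by omega), hlenr]
  rw [hhead, List.map_map, List.flatMap_def, List.map_map]
  have htail : (List.range (P.length - r - 1)).map
        ((fun (r1 : Nat) => ((List.range w).filter (fun (c1 : Nat) => decide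
            ((((c1 : Int) ≥ (c : Int)) ∨ ((c1 : Int) < (c : Int) ∧ (r1 : Int) ≠ (r : Int))) ∧
              (P.getD r []).getD c 0 ≠ (P.getD r1 []).getD c1 0))).map
          (fun (col : Nat) => (P.getD r1 []).getD col 0)) ∘ ((fun k => r + k) ∘ Nat.succ))
      = (List.range (P.length - r - 1)).map
          (fun k => (P.getD (r + Nat.succ k) []).filter
            (fun v => decide ((P.getD r []).getD c 0 ≠ v))) := by
    apply List.map_eq_map_iff.mpr
    intro k hk
    simp only [List.mem_range] at hk
    show ((List.range w).filter (fun (c1 : Nat) => decide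
          ((((c1 : Int) ≥ (c : Int)) ∨ ((c1 : Int) < (c : Int) ∧ ((r + Nat.succ k : Nat) : Int) ≠ (r : Int))) ∧
            (P.getD r []).getD c 0 ≠ (P.getD (r + Nat.succ k) []).getD c1 0))).map
        (fun (col : Nat) => (P.getD (r + Nat.succ k) []).getD col 0)
      = (P.getD (r + Nat.succ k) []).filter (fun v => decide ((P.getD r []).getD c 0 ≠ v))
    have h2 : (List.range w).filter (fun (c1 : Nat) => decide
          ((((c1 : Int) ≥ (c : Int)) ∨ ((c1 : Int) < (c : Int) ∧ ((r + Nat.succ k : Nat) : Int) ≠ (r : Int))) ∧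
            (P.getD r []).getD c 0 ≠ (P.getD (r + Nat.succ k) []).getD c1 0))
        = (List.range w).filter (fun (c1 : Nat) =>
            decide ((P.getD r []).getD c 0 ≠ (P.getD (r + Nat.succ k) []).getD c1 0)) := by
      apply List.filter_congr
      intro a _
      have h1 : ((a : Int) ≥ (c : Int) ∨ ((a : Int) < (c : Int) ∧ ((r + Nat.succ k : Nat) : Int) ≠ (r : Int))) := by
        push_cast
        omega
      rw [decide_eq_decide]
      exact ⟨fun h => h.2, fun hx => ⟨h1, hx⟩⟩
    rw [h2]
    rw [show (fun (c1 : Nat) => decide ((P.getD r []).getD c 0 ≠ (P.getD (r + Nat.succ k) []).getD c1 0))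
        = ((fun v => decide ((P.getD r []).getD c 0 ≠ v)) ∘ (fun (c1 : Nat) => (P.getD (r + Nat.succ k) []).getD c1 0)) from rfl]
    rw [← List.filter_map]
    have hlen1 : (P.getD (r + Nat.succ k) []).length = w := hw _ (hrowmem _ (by omega))
    rw [← hlen1, pvMapGetDSelf]
  rw [htail]
  rw [show (fun k => List.filter (fun v => decide ((P.getD r []).getD c 0 ≠ v)) (P.getD (r + Nat.succ k) []))
      = (List.filter (fun v => decide ((P.getD r []).getD c 0 ≠ v)) ∘ (fun k => P.getD (r + Nat.succ k) [])) from rfl]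
  rw [← List.map_map]
  have hinner : (List.range (P.length - r - 1)).map (fun k => P.getD (r + Nat.succ k) [])
      = P.drop (r + 1) := by
    have := pvMapGetDDrop P [] (r + 1) (by omega)
    rw [show P.length - (r + 1) = P.length - r - 1 from by omega] at this
    rw [← this]
    apply List.map_eq_map_iff.mpr
    intro k _
    congr 1
    omega
  rw [hinner, ← List.flatMap_def, ← pvFilterFlatMap, ← List.filter_append]
  rw [← pvFlatDrop P w hw r c hr (le_of_lt hc)]
  have hbound : r * w + c < (P.flatMap (fun row => row)).length := by
    rw [pvFlatLen P w hw]
    have h1 : r + 1 ≤ P.length := hr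
    nlinarith
  rw [← List.getElem_cons_drop hbound, List.filter_cons]
  have hgi : (P.flatMap (fun row => row))[r * w + c] = (P.getD r []).getD c 0 := by
    rw [← pvFlatGetD P w hw r c hr hc]
    rw [List.getD_eq_getElem _ _ hbound]
  rw [hgi]
  simp only [ne_eq, not_true_eq_false, decide_false, Bool.false_eq_true, if_false]
  apply List.filter_congr
  intro x _
  simp only [decide_not, bne]
  congr 1
  rw [show (x == (P.getD r []).getD c 0) = decide (x = (P.getD r []).getD c 0) from rfl,
    decide_eq_decide]
  exact eq_comm

-- two-grid version: A reads grid P through the first w columns, which agree with the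
-- w-wide grid Q cell by cell
theorem pvPayload2 (P Q : List (List Int)) (w : Nat) (hQ : ∀ row ∈ Q, row.length = w)
    (hlen : Q.length = P.length)
    (hacc : ∀ i, i < P.length → ∀ j, j < w → (P.getD i []).getD j 0 = (Q.getD i []).getD j 0)
    (r c : Nat) (hr : r < P.length) (hc : c < w) :
    ((List.range P.length).filter (fun (r1 : Nat) => decide ((r1 : Int) ≥ (r : Int)))).flatMap
      (fun (r1 : Nat) => ((List.range w).filter (fun (c1 : Nat) => decide
          ((((c1 : Int) ≥ (c : Int)) ∨ ((c1 : Int) < (c : Int) ∧ (r1 : Int) ≠ (r : Int))) ∧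
            (P.getD r []).getD c 0 ≠ (P.getD r1 []).getD c1 0))).map
        (fun (col : Nat) => (P.getD r1 []).getD col 0))
    = ((Q.flatMap (fun row => row)).drop (r * w + c + 1)).filter
        (fun x => x != (P.getD r []).getD c 0) := by
  have htc : (P.getD r []).getD c 0 = (Q.getD r []).getD c 0 := hacc r hr c hc
  rw [htc]
  have hstep : ∀ r1, r1 < P.length →
      ((List.range w).filter (fun (c1 : Nat) => decide
          ((((c1 : Int) ≥ (c : Int)) ∨ ((c1 : Int) < (c : Int) ∧ (r1 : Int) ≠ (r : Int))) ∧
            (Q.getD r []).getD c 0 ≠ (P.getD r1 []).getD c1 0))).map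
        (fun (col : Nat) => (P.getD r1 []).getD col 0)
      = ((List.range w).filter (fun (c1 : Nat) => decide
          ((((c1 : Int) ≥ (c : Int)) ∨ ((c1 : Int) < (c : Int) ∧ (r1 : Int) ≠ (r : Int))) ∧
            (Q.getD r []).getD c 0 ≠ (Q.getD r1 []).getD c1 0))).map
        (fun (col : Nat) => (Q.getD r1 []).getD col 0) := by
    intro r1 hr1
    have hval : ∀ j, j < w → (P.getD r1 []).getD j 0 = (Q.getD r1 []).getD j 0 := hacc r1 hr1
    have hfil : (List.range w).filter (fun (c1 : Nat) => decide
          ((((c1 : Int) ≥ (c : Int)) ∨ ((c1 : Int) < (c : Int) ∧ (r1 : Int) ≠ (r : Int))) ∧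
            (Q.getD r []).getD c 0 ≠ (P.getD r1 []).getD c1 0))
        = (List.range w).filter (fun (c1 : Nat) => decide
          ((((c1 : Int) ≥ (c : Int)) ∨ ((c1 : Int) < (c : Int) ∧ (r1 : Int) ≠ (r : Int))) ∧
            (Q.getD r []).getD c 0 ≠ (Q.getD r1 []).getD c1 0)) := by
      apply List.filter_congr
      intro a ha
      rw [hval a (List.mem_range.mp ha)]
    rw [hfil]
    apply List.map_eq_map_iff.mpr
    intro col hcol
    have : col ∈ List.range w := List.mem_of_mem_filter hcol
    exact hval col (List.mem_range.mp this)
  rw [List.flatMap_def, List.flatMap_def]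
  have hmaps : (List.map (fun (r1 : Nat) => ((List.range w).filter (fun (c1 : Nat) => decide
          ((((c1 : Int) ≥ (c : Int)) ∨ ((c1 : Int) < (c : Int) ∧ (r1 : Int) ≠ (r : Int))) ∧
            (Q.getD r []).getD c 0 ≠ (P.getD r1 []).getD c1 0))).map
        (fun (col : Nat) => (P.getD r1 []).getD col 0))
        ((List.range P.length).filter (fun (r1 : Nat) => decide ((r1 : Int) ≥ (r : Int)))))
      = (List.map (fun (r1 : Nat) => ((List.range w).filter (fun (c1 : Nat) => decide
          ((((c1 : Int) ≥ (c : Int)) ∨ ((c1 : Int) < (c : Int) ∧ (r1 : Int) ≠ (r : Int))) ∧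
            (Q.getD r []).getD c 0 ≠ (Q.getD r1 []).getD c1 0))).map
        (fun (col : Nat) => (Q.getD r1 []).getD col 0))
        ((List.range P.length).filter (fun (r1 : Nat) => decide ((r1 : Int) ≥ (r : Int))))) := by
    apply List.map_eq_map_iff.mpr
    intro r1 hr1
    have : r1 ∈ List.range P.length := List.mem_of_mem_filter hr1
    exact hstep r1 (List.mem_range.mp this)
  rw [hmaps, ← hlen, ← List.flatMap_def]
  exact pvPayloadRect Q w hQ r c (hlen.symm ▸ hr) hc

theorem get_inversion_dict_equal (puzzle : List (List Int))
    (hpre : Pre_get_inversion_dict puzzle) :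
    get_inversion_dict puzzle = get_inversion_dict_alt puzzle := by
  unfold Pre_get_inversion_dict at hpre
  have hw0 : ((PySem.List.pyGet? puzzle 0).getD []).length = (puzzle.headD []).length := by
    cases puzzle <;> simp [PySem.List.pyGet?, PySem.List.pyIdx?]
  have hrowmem : ∀ i : Nat, i < puzzle.length → puzzle.getD i [] ∈ puzzle := by
    intro i hi
    rw [List.getD_eq_getElem _ _ hi]
    exact List.getElem_mem hi
  set Q := puzzle.map (fun row => row.take (puzzle.headD []).length) with hQdef
  have hQw : ∀ row ∈ Q, row.length = (puzzle.headD []).length := by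
    intro row hrow
    rw [hQdef] at hrow
    obtain ⟨row0, hr0, rfl⟩ := List.mem_map.mp hrow
    rw [List.length_take]
    exact Nat.min_eq_left (hpre row0 hr0)
  have hQlen : Q.length = puzzle.length := by rw [hQdef]; simp
  have hacc : ∀ i, i < puzzle.length → ∀ j, j < (puzzle.headD []).length →
      (puzzle.getD i []).getD j 0 = (Q.getD i []).getD j 0 := by
    intro i hi j hj
    have hiQ : i < Q.length := by omega
    have hQi : Q.getD i [] = (puzzle.getD i []).take (puzzle.headD []).length := by
      rw [hQdef, List.getD_eq_getElem _ _ (by simpa using hi), List.getElem_map,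
        List.getD_eq_getElem _ _ hi]
    rw [hQi]
    have hjlen : j < (puzzle.getD i []).length := by
      have := hpre _ (hrowmem i hi)
      omega
    have hjtake : j < ((puzzle.getD i []).take (puzzle.headD []).length).length := by
      rw [List.length_take]
      omega
    rw [List.getD_eq_getElem _ _ hjlen, List.getD_eq_getElem _ _ hjtake, List.getElem_take]
  have hB : get_inversion_dict_alt puzzle
      = ((List.range (puzzle.length * (puzzle.headD []).length)).foldl
          (fun d i => d.insert ((Q.flatMap (fun row => row)).getD i 0)
            (((Q.flatMap (fun row => row)).drop (i + 1)).filter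
              (fun x => x != (Q.flatMap (fun row => row)).getD i 0)))
          PySem.Dict.empty).items := by
    unfold get_inversion_dict_alt
    dsimp only
    have hflat : (puzzle.flatMap (fun row =>
          (PySem.List.pyRange 0 (((PySem.List.pyGet? puzzle 0).getD []).length : Int)).map
            (fun c => (PySem.List.pyGet? row c).getD 0)))
        = Q.flatMap (fun row => row) := by
      rw [hQdef, List.flatMap_def, List.flatMap_def, List.map_map]
      congr 1
      apply List.map_eq_map_iff.mpr
      intro row hrow
      simp only [Function.comp, hw0, PySem.List.pyRange_zero_natCast, List.map_map]
      have h1 : ∀ c : Nat, (PySem.List.pyGet? row ((c : Nat) : Int)).getD 0 = row.getD c 0 := by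
        intro c
        simp [PySem.List.pyGet?_natCast, List.getD_eq_getElem?_getD]
      have h2 : ((fun c => (PySem.List.pyGet? row c).getD 0) ∘ fun (k : Nat) => ((k : Nat) : Int))
          = (fun (k : Nat) => row.getD k 0) := by
        funext k
        exact h1 k
      rw [h2, pvMapGetDTake row 0 _ (hpre row hrow)]
    rw [hflat]
    rw [pvEnumEq, List.foldl_map]
    rw [pvFlatLen Q _ hQw, hQlen]
    congr 1
    apply PySem.List.foldl_congr_mem
    intro d k hk
    have hcast : ((k : Int) + 1) = ((k + 1 : Nat) : Int) := by push_cast; ring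
    rw [hcast, PySem.List.slice_from_natCast]
    rfl
  rw [hB]
  unfold get_inversion_dict
  dsimp only
  simp only [hw0, PySem.List.pyRange_zero_natCast, List.foldl_map]
  congr 1
  have hN := pvNestedRange (fun d i => d.insert ((Q.flatMap (fun row => row)).getD i 0)
    (((Q.flatMap (fun row => row)).drop (i + 1)).filter
      (fun x => x != (Q.flatMap (fun row => row)).getD i 0)))
    puzzle.length (puzzle.headD []).length PySem.Dict.empty
  rw [← hN]
  apply PySem.List.foldl_congr_mem
  intro d r hr
  apply PySem.List.foldl_congr_mem
  intro d' c hc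
  have hcell := pvCellFold
    ((PySem.List.pyGet? ((PySem.List.pyGet? puzzle (r:Int)).getD []) (c:Int)).getD 0)
    (fun (row : Nat) => ((row : Int) ≥ (r : Int)))
    (fun (row col : Nat) =>
      ((col : Int) ≥ (c : Int) ∨ ((col : Int) < (c : Int) ∧ (row : Int) ≠ (r : Int))) ∧
        (PySem.List.pyGet? ((PySem.List.pyGet? puzzle (r:Int)).getD []) (c:Int)).getD 0 ≠
          (PySem.List.pyGet? ((PySem.List.pyGet? puzzle (row:Int)).getD []) (col:Int)).getD 0)
    (fun (row col : Nat) => (PySem.List.pyGet? ((PySem.List.pyGet? puzzle (row:Int)).getD []) (col:Int)).getD 0)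
    (List.range (puzzle.headD []).length) (List.range puzzle.length) d' []
  rw [hcell]
  have hidx : ∀ (i j : Nat),
      (PySem.List.pyGet? ((PySem.List.pyGet? puzzle (i : Int)).getD []) (j : Int)).getD 0
        = (puzzle.getD i []).getD j 0 := by
    intro i j
    simp [PySem.List.pyGet?_natCast, List.getD_eq_getElem?_getD]
  simp only [hidx, List.nil_append]
  have hrn : r < puzzle.length := List.mem_range.mp hr
  have hcn : c < (puzzle.headD []).length := List.mem_range.mp hc
  rw [pvFlatGetD Q _ hQw r c (hQlen.symm ▸ hrn) hcn]
  rw [← hacc r hrn c hcn]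
  exact congrArg _ (pvPayload2 puzzle Q _ hQw hQlen hacc r c hrn hcn)

-- ===== VERDICT (by name: the statement is the Claim_ definition above) =====
theorem get_inversion_dict_spec : Claim_equal_get_inversion_dict := by
  intro puzzle _ hpre
  unfold Spec_get_inversion_dict
  exact get_inversion_dict_equal puzzle hpre
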